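-- pv_equiv track=rewrite | github.com/SijanC147/Msc | tsaplay/utils/data.py | accum_tuple_list_gen
-- ===== SOURCE A (Python) =====
-- from itertools import chain, groupby
-- from operator import itemgetter
--
-- def accum_tuple_list_gen(gen, sort=True):
--     data = sorted(chain(*gen))
--     data = [
--         (key, sum(j for _, j in group))
--         for key, group in groupby(data, key=itemgetter(0))
--     ]
--     if sort:
--         data.sort(key=itemgetter(1), reverse=True)
--     return data
-- ===== SOURCE B (Python) =====
-- from operator import itemgetter
--
-- def accum_tuple_list_gen(gen, sort=True):
--     totals = {}
--     for chunk in gen: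
--         for key, val in chunk:
--             totals[key] = totals.get(key, 0) + val
--     data = sorted(totals.items(), key=itemgetter(0))
--     if sort:
--         data.sort(key=itemgetter(1), reverse=True)
--     return data
-- ===== Notes on version B (the rewrite author's own statement) =====
-- stated objective: faster
-- what changed: Replaces sort-all-pairs-then-groupby (comparison sort of every (key,value) pair) with a one-pass dict accumulation of per-key sums followed by sorting only the distinct keys, then the same stable sort by sum.
import Mathlib
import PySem

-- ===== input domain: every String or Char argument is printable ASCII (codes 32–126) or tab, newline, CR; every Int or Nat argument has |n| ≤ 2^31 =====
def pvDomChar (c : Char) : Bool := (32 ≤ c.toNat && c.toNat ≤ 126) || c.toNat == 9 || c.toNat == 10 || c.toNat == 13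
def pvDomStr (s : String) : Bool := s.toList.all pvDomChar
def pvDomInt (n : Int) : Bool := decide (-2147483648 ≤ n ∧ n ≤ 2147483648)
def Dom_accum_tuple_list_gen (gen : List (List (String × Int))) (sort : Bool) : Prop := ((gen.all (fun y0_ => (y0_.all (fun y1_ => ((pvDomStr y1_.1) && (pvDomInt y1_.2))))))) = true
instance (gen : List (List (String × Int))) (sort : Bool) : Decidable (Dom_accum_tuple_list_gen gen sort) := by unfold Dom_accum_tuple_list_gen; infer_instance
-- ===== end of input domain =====

-- B replaces A's sort-all-pairs-then-groupby with a one-pass dict accumulation of per-key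
-- sums followed by sorting only the distinct keys (objective: faster by that algorithm change).

-- ===== PORT A =====
-- itertools.groupby(data, key=itemgetter(0)) with the per-group sum, ported by hand:
-- exact for grouping consecutive runs of equal first components and summing their seconds.
def pvGroupSum : List (String × Int) → List (String × Int)
  | [] => []
  | (k, v) :: t =>
      (k, v + ((t.takeWhile (fun p => p.1 == k)).map Prod.snd).sum)
        :: pvGroupSum (t.dropWhile (fun p => p.1 == k))
  termination_by l => l.length
  decreasing_by
    have := List.length_dropWhile_le (fun p : String × Int => p.1 == k) t
    simp only [List.length_cons]
    omega

def accum_tuple_list_gen (gen : List (List (String × Int))) (sort : Bool) : List (String × Int) :=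
  -- data = sorted(chain(*gen))  (tuples compare lexicographically)
  let data := PySem.List.sorted2 gen.flatten (fun p => p.1) (fun p => p.2)
  -- data = [(key, sum(...)) for key, group in groupby(data, key=itemgetter(0))]
  let data := pvGroupSum data
  if sort then PySem.List.sorted data (fun p => p.2) true else data

-- ===== PORT B =====
def accum_tuple_list_gen_alt (gen : List (List (String × Int))) (sort : Bool) : List (String × Int) :=
  let totals := gen.foldl
    (fun d chunk => chunk.foldl (fun d p => d.insert p.1 (d.getD p.1 0 + p.2)) d)
    PySem.Dict.empty
  let data := PySem.List.sorted totals.items (fun p => p.1)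
  if sort then PySem.List.sorted data (fun p => p.2) true else data

-- ===== PRECONDITION & SPEC =====
def Spec_accum_tuple_list_gen (gen : List (List (String × Int))) (sort : Bool) (out : List (String × Int)) : Prop := out = accum_tuple_list_gen_alt gen sort
instance (gen : List (List (String × Int))) (sort : Bool) (out : List (String × Int)) : Decidable (Spec_accum_tuple_list_gen gen sort out) := by unfold Spec_accum_tuple_list_gen; infer_instance

-- ===== CLAIM (what is proved, stated in full; the proofs are below) =====
def Claim_equal_accum_tuple_list_gen : Prop := ∀ (gen : List (List (String × Int))) (sort : Bool), Dom_accum_tuple_list_gen gen sort → Spec_accum_tuple_list_gen gen sort (accum_tuple_list_gen gen sort)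

-- ===== LEMMAS AND PROOFS =====

-- total value accumulated for a key
def pvS (l : List (String × Int)) (k : String) : Int :=
  ((l.filter (fun p => p.1 == k)).map Prod.snd).sum

lemma pvS_cons (a : String × Int) (t : List (String × Int)) (k : String) :
    pvS (a :: t) k = (if a.1 = k then a.2 else 0) + pvS t k := by
  by_cases h : a.1 = k <;> simp [pvS, h]

lemma pvS_append (w r : List (String × Int)) (k : String) :
    pvS (w ++ r) k = pvS w k + pvS r k := by
  simp [pvS, List.filter_append]

lemma pvS_perm {l₁ l₂ : List (String × Int)} (h : l₁.Perm l₂) (k : String) :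
    pvS l₁ k = pvS l₂ k :=
  ((h.filter _).map _).sum_eq

lemma pvS_eq_zero {l : List (String × Int)} {k : String} (h : ∀ p ∈ l, p.1 ≠ k) :
    pvS l k = 0 := by
  have : l.filter (fun p => p.1 == k) = [] := by
    simp only [List.filter_eq_nil_iff]
    intro p hp
    simpa using h p hp
  simp [pvS, this]

lemma pv_insertBy_pairwise {α : Type} {R : α → α → Prop} (before : α → α → Bool)
    (h1 : ∀ a b, before a b = true → R a b) (h2 : ∀ a b, before a b = false → R b a)
    (ht : ∀ a b c, R a b → R b c → R a c) :
    ∀ (l : List α) (x : α), l.Pairwise R → (PySem.List.insertBy before x l).Pairwise R := by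
  intro l
  induction l with
  | nil => intro x _; simp [PySem.List.insertBy]
  | cons y ys ih =>
    intro x hp
    rcases List.pairwise_cons.mp hp with ⟨hy, hys⟩
    by_cases hb : before x y = true
    · rw [show PySem.List.insertBy before x (y :: ys) = x :: y :: ys from by
        simp [PySem.List.insertBy, hb]]
      refine List.pairwise_cons.mpr ⟨?_, hp⟩
      intro z hz
      rcases List.mem_cons.mp hz with rfl | hz'
      · exact h1 _ _ hb
      · exact ht _ _ _ (h1 _ _ hb) (hy z hz')
    · have hbf : before x y = false := by simpa using hb
      rw [show PySem.List.insertBy before x (y :: ys) = y :: PySem.List.insertBy before x ys from by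
        simp [PySem.List.insertBy, hbf]]
      refine List.pairwise_cons.mpr ⟨?_, ih x hys⟩
      intro z hz
      rcases (PySem.List.mem_insertBy before x z ys).mp hz with rfl | hz'
      · exact h2 _ _ hbf
      · exact hy z hz'

lemma pv_foldl_insertBy_pairwise {α : Type} {R : α → α → Prop} (before : α → α → Bool)
    (h1 : ∀ a b, before a b = true → R a b) (h2 : ∀ a b, before a b = false → R b a)
    (ht : ∀ a b c, R a b → R b c → R a c) :
    ∀ (xs acc : List α), acc.Pairwise R →
      (xs.foldl (fun acc x => PySem.List.insertBy before x acc) acc).Pairwise R := by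
  intro xs
  induction xs with
  | nil => intro acc h; exact h
  | cons x t ih =>
    intro acc h
    exact ih _ (pv_insertBy_pairwise before h1 h2 ht acc x h)

lemma pv_sorted2_pairwise_fst (xs : List (String × Int)) :
    (PySem.List.sorted2 xs (fun p => p.1) (fun p => p.2)).Pairwise
      (fun a b => a.1 ≤ b.1) := by
  show (xs.foldl (fun acc x => PySem.List.insertBy
      (fun a b => decide (a.1 < b.1) || (!decide (b.1 < a.1) && decide (a.2 < b.2))) x acc)
      []).Pairwise (fun a b => a.1 ≤ b.1)
  apply pv_foldl_insertBy_pairwise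
  · intro a b h
    simp only [Bool.or_eq_true, Bool.and_eq_true, Bool.not_eq_true', decide_eq_true_eq,
      decide_eq_false_iff_not] at h
    rcases h with h | ⟨h, _⟩
    · exact le_of_lt h
    · exact not_lt.mp h
  · intro a b h
    simp only [Bool.or_eq_false_iff, Bool.and_eq_false_iff, Bool.not_eq_false',
      decide_eq_true_eq, decide_eq_false_iff_not] at h
    exact not_lt.mp h.1
  · intro a b c hab hbc
    exact le_trans hab hbc
  · exact List.Pairwise.nil

lemma pvGroupSum_spec : ∀ (l : List (String × Int)),
    l.Pairwise (fun a b => a.1 ≤ b.1) →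
    (∀ k, k ∈ (pvGroupSum l).map Prod.fst ↔ k ∈ l.map Prod.fst)
    ∧ (∀ p ∈ pvGroupSum l, p.2 = pvS l p.1)
    ∧ (pvGroupSum l).Pairwise (fun a b => a.1 < b.1) := by
  intro l
  induction l using pvGroupSum.induct with
  | case1 => simp [pvGroupSum, pvS]
  | case2 k v t ih =>
    intro hp
    rcases List.pairwise_cons.mp hp with ⟨hhead, ht⟩
    have htw : t.takeWhile (fun p => p.1 == k) ++ t.dropWhile (fun p => p.1 == k) = t :=
      List.takeWhile_append_dropWhile
    have hw : ∀ p ∈ t.takeWhile (fun p => p.1 == k), p.1 = k := by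
      intro p hpw
      simpa using List.mem_takeWhile_imp hpw
    have hrsub : (t.dropWhile (fun p => p.1 == k)).Sublist t :=
      List.dropWhile_sublist _
    have hrp : (t.dropWhile (fun p => p.1 == k)).Pairwise (fun a b => a.1 ≤ b.1) :=
      ht.sublist hrsub
    have hkr : ∀ p ∈ t.dropWhile (fun p => p.1 == k), k < p.1 := by
      cases hcase : t.dropWhile (fun p => p.1 == k) with
      | nil => simp
      | cons h0 rt =>
        have hh0f : (fun p : String × Int => p.1 == k) h0 = false := by
          have h2 := List.head?_dropWhile_not (fun p : String × Int => p.1 == k) t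
          rw [hcase] at h2
          simpa using h2
        have hh0ne : h0.1 ≠ k := by simpa using hh0f
        have hh0mem : h0 ∈ t := hrsub.subset (hcase ▸ List.mem_cons_self)
        have hkh0 : k < h0.1 := lt_of_le_of_ne (hhead h0 hh0mem) (Ne.symm hh0ne)
        intro p hpmem
        rcases List.mem_cons.mp hpmem with rfl | hpr
        · exact hkh0
        · have := (hcase ▸ hrp : (h0 :: rt).Pairwise (fun a b => a.1 ≤ b.1))
          rcases List.pairwise_cons.mp this with ⟨hh0le, _⟩
          exact lt_of_lt_of_le hkh0 (hh0le p hpr)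
    obtain ⟨ihmem, ihsum, ihlt⟩ := ih hrp
    have hgs : pvGroupSum ((k, v) :: t) =
        (k, v + ((t.takeWhile (fun p => p.1 == k)).map Prod.snd).sum)
          :: pvGroupSum (t.dropWhile (fun p => p.1 == k)) := by
      rw [pvGroupSum]
    refine ⟨?_, ?_, ?_⟩
    · intro k'
      rw [hgs]
      constructor
      · intro hmem
        rcases List.mem_map.mp hmem with ⟨p, hp, rfl⟩
        rcases List.mem_cons.mp hp with rfl | hpr
        · exact List.mem_map.mpr ⟨(k, v), List.mem_cons_self, rfl⟩
        · have hk : p.1 ∈ (t.dropWhile (fun p => p.1 == k)).map Prod.fst :=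
            (ihmem p.1).mp (List.mem_map.mpr ⟨p, hpr, rfl⟩)
          rcases List.mem_map.mp hk with ⟨q, hq, he⟩
          exact List.mem_map.mpr ⟨q, List.mem_cons_of_mem _ (hrsub.subset hq), he⟩
      · intro hmem
        rcases List.mem_map.mp hmem with ⟨p, hp, rfl⟩
        rcases List.mem_cons.mp hp with rfl | hpt
        · exact List.mem_map.mpr ⟨_, List.mem_cons_self, rfl⟩
        · rw [← htw] at hpt
          rcases List.mem_append.mp hpt with hq | hq
          · exact List.mem_map.mpr ⟨_, List.mem_cons_self, (hw p hq).symm⟩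
          · have hk : p.1 ∈ (pvGroupSum (t.dropWhile (fun p => p.1 == k))).map Prod.fst :=
              (ihmem p.1).mpr (List.mem_map.mpr ⟨p, hq, rfl⟩)
            rcases List.mem_map.mp hk with ⟨q, hq2, he⟩
            exact List.mem_map.mpr ⟨q, List.mem_cons_of_mem _ hq2, he⟩
    · intro p hpmem
      rw [hgs] at hpmem
      have hSw : pvS (t.takeWhile (fun p => p.1 == k)) k =
          ((t.takeWhile (fun p => p.1 == k)).map Prod.snd).sum := by
        have hfw : (t.takeWhile (fun p => p.1 == k)).filter (fun p => p.1 == k) =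
            t.takeWhile (fun p => p.1 == k) := by
          apply List.filter_eq_self.mpr
          intro p hp
          simpa using hw p hp
        simp [pvS, hfw]
      have e2k : ∀ k', pvS t k' = pvS (t.takeWhile (fun p => p.1 == k)) k'
          + pvS (t.dropWhile (fun p => p.1 == k)) k' := by
        intro k'
        have e := pvS_append (t.takeWhile (fun p => p.1 == k))
          (t.dropWhile (fun p => p.1 == k)) k'
        rw [htw] at e
        exact e
      rcases List.mem_cons.mp hpmem with rfl | hpr
      · show v + ((t.takeWhile (fun p => p.1 == k)).map Prod.snd).sum = pvS ((k, v) :: t) k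
        have e1 : pvS ((k, v) :: t) k = v + pvS t k := by
          rw [pvS_cons]; simp
        have e4 : pvS (t.dropWhile (fun p => p.1 == k)) k = 0 :=
          pvS_eq_zero (fun q hq => ne_of_gt (hkr q hq))
        rw [e1, e2k k, hSw, e4]
        ring
      · have h1 := ihsum p hpr
        have hk : p.1 ∈ (t.dropWhile (fun p => p.1 == k)).map Prod.fst :=
          (ihmem p.1).mp (List.mem_map.mpr ⟨p, hpr, rfl⟩)
        rcases List.mem_map.mp hk with ⟨q, hq, he⟩
        have hkp : k < p.1 := he ▸ hkr q hq
        have e1 : pvS ((k, v) :: t) p.1 = pvS t p.1 := by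
          rw [pvS_cons, if_neg (ne_of_lt hkp)]
          ring
        have e3 : pvS (t.takeWhile (fun p => p.1 == k)) p.1 = 0 :=
          pvS_eq_zero (fun q' hq' => by rw [hw q' hq']; exact ne_of_lt hkp)
        rw [h1, e1, e2k p.1, e3]
        ring
    · rw [hgs]
      refine List.pairwise_cons.mpr ⟨?_, ihlt⟩
      intro q hq
      have hqkey : q.1 ∈ (t.dropWhile (fun p => p.1 == k)).map Prod.fst :=
        (ihmem q.1).mp (List.mem_map.mpr ⟨q, hq, rfl⟩)
      rcases List.mem_map.mp hqkey with ⟨q', hq', he⟩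
      exact he ▸ hkr q' hq'

lemma pv_totals_getD : ∀ (l : List (String × Int)) (d : PySem.Dict String Int) (k : String),
    (l.foldl (fun d p => d.insert p.1 (d.getD p.1 0 + p.2)) d).getD k 0
      = d.getD k 0 + pvS l k := by
  intro l
  induction l with
  | nil => intro d k; simp [pvS]
  | cons a t ih =>
    intro d k
    rw [List.foldl_cons, ih, pvS_cons]
    by_cases h : a.1 = k
    · rw [← h, PySem.Dict.getD_insert_self]
      simp
      ring
    · rw [PySem.Dict.getD_insert_of_ne _ _ _ (fun hh => h hh.symm)]
      simp [h]

lemma pv_map_of_snd_eq (g : String → Int) : ∀ (l : List (String × Int)),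
    (∀ p ∈ l, p.2 = g p.1) → l = l.map (fun p => (p.1, g p.1)) := by
  intro l
  induction l with
  | nil => intro _; rfl
  | cons a t ih =>
    intro h
    have ha : a.2 = g a.1 := h a List.mem_cons_self
    have : a = (a.1, g a.1) := by
      rcases a with ⟨a1, a2⟩
      simpa using ha
    rw [List.map_cons, ← this, ← ih (fun p hp => h p (List.mem_cons_of_mem a hp))]

-- ===== VERDICT (by name: the statement is the Claim_ definition above) =====
theorem accum_tuple_list_gen_spec : Claim_equal_accum_tuple_list_gen := by
  intro gen sort _
  unfold Spec_accum_tuple_list_gen accum_tuple_list_gen accum_tuple_list_gen_alt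
  have hflat : gen.foldl
      (fun d chunk => chunk.foldl (fun d p => d.insert p.1 (d.getD p.1 0 + p.2)) d)
      (PySem.Dict.empty : PySem.Dict String Int)
      = gen.flatten.foldl (fun d p => d.insert p.1 (d.getD p.1 0 + p.2)) PySem.Dict.empty :=
    List.foldl_flatten.symm
  set flat := gen.flatten with hflatdef
  set totals := flat.foldl (fun d p => d.insert p.1 (d.getD p.1 0 + p.2)) PySem.Dict.empty
    with htotals
  have hnodup : totals.keys.Nodup :=
    PySem.Dict.nodup_keys_foldl_insert_key flat Prod.fst
      (fun d p => d.getD p.1 0 + p.2) PySem.Dict.empty PySem.Dict.nodup_keys_empty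
  have hmemkeys : ∀ x, x ∈ totals.keys ↔ x ∈ flat.map Prod.fst := by
    intro x
    rw [htotals, PySem.Dict.keys_foldl_insert_key flat Prod.fst
      (fun d p => d.getD p.1 0 + p.2) PySem.Dict.empty]
    rw [PySem.Dict.keys_empty]
    simp [PySem.Set.mem_update]
  have hgetD : ∀ k, totals.getD k 0 = pvS flat k := by
    intro k
    rw [htotals, pv_totals_getD, PySem.Dict.getD_empty]
    ring
  have hitems : totals.items = totals.keys.map (fun k => (k, pvS flat k)) := by
    rw [PySem.Dict.items_eq_map_keys totals hnodup 0]
    exact List.map_congr_left (fun a _ => by rw [hgetD a])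
  have hsl : (PySem.List.sorted2 flat (fun p => p.1) (fun p => p.2)).Pairwise
      (fun a b => a.1 ≤ b.1) := pv_sorted2_pairwise_fst flat
  obtain ⟨hmem, hsum, hlt⟩ := pvGroupSum_spec _ hsl
  have hslperm : (PySem.List.sorted2 flat (fun p => p.1) (fun p => p.2)).Perm flat :=
    PySem.List.sorted2_perm flat _ _ false
  have hsum' : ∀ p ∈ pvGroupSum (PySem.List.sorted2 flat (fun p => p.1) (fun p => p.2)),
      p.2 = pvS flat p.1 :=
    fun p hp => (hsum p hp).trans (pvS_perm hslperm p.1)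
  have hga := pv_map_of_snd_eq (pvS flat) _ hsum'
  have hnodupA : ((pvGroupSum (PySem.List.sorted2 flat (fun p => p.1) (fun p => p.2))).map
      Prod.fst).Nodup :=
    (List.pairwise_map.mpr hlt).imp (fun h => ne_of_lt h)
  have hkeysperm : ((pvGroupSum (PySem.List.sorted2 flat (fun p => p.1) (fun p => p.2))).map
      Prod.fst).Perm totals.keys := by
    refine (List.perm_ext_iff_of_nodup hnodupA hnodup).mpr ?_
    intro a
    rw [hmem a, hmemkeys a]
    exact (hslperm.map Prod.fst).mem_iff
  have hperm_items : (pvGroupSum (PySem.List.sorted2 flat (fun p => p.1) (fun p => p.2))).Perm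
      totals.items := by
    rw [hitems]
    have h1 : pvGroupSum (PySem.List.sorted2 flat (fun p => p.1) (fun p => p.2))
        = ((pvGroupSum (PySem.List.sorted2 flat (fun p => p.1) (fun p => p.2))).map
            Prod.fst).map (fun k => (k, pvS flat k)) := by
      rw [List.map_map]; exact hga
    rw [h1]
    exact hkeysperm.map _
  have hbase : PySem.List.sorted totals.items (fun p => p.1)
      = pvGroupSum (PySem.List.sorted2 flat (fun p => p.1) (fun p => p.2)) :=
    PySem.List.sorted_eq_of_perm_of_pairwise_lt _ _ _ hperm_items hlt
  simp only [hflat, hbase]
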